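-- pv_equiv track=rewrite | github.com/kkhao/research-tracker | research-tracker/backend/crawler.py | _build_arxiv_keyword_query
-- ===== SOURCE A (Python) =====
-- def _build_arxiv_keyword_query(keywords: list[str], batch_size: int = 6) -> list[str]:
--     """Build arXiv search_query strings: (all:kw1+OR+...). 无分类限制。"""
--     queries = []
--     for i in range(0, len(keywords), batch_size):
--         batch = keywords[i : i + batch_size]
--         terms = []
--         for kw in batch:
--             if " " in kw:
--                 terms.append(f'all:"{kw.replace(" ", "+")}"')
--             else:
--                 terms.append(f"all:{kw}")
--         kw_part = "+OR+".join(terms)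
--         queries.append(f"({kw_part})")
--     return queries
-- ===== SOURCE B (Python) =====
-- def _build_arxiv_keyword_query(keywords: list[str], batch_size: int = 6) -> list[str]:
--     """Single streaming pass: grow the current query string term by term and
--     flush it whenever batch_size terms have been absorbed (no slicing, no range)."""
--     queries = []
--     cur = ""
--     n = 0
--     for kw in keywords:
--         term = f'all:"{kw.replace(" ", "+")}"' if " " in kw else f"all:{kw}"
--         cur = term if n == 0 else cur + "+OR+" + term
--         n += 1
--         if n == batch_size:
--             queries.append(f"({cur})")
--             cur = ""
--             n = 0
--     if n:
--         queries.append(f"({cur})")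
--     return queries
-- ===== Notes on version B (the rewrite author's own statement) =====
-- stated objective: alternative
-- what changed: B replaces A's batch-slicing nested loop (range/slice per batch, inner term list joined at the end) by one streaming pass that grows the current query string term by term with a counter and flushes it each time batch_size terms are absorbed.
-- outside the precondition, e.g. on _build_arxiv_keyword_query(['a'], -1): A returns [], B returns ['(all:a)']
import Mathlib
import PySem

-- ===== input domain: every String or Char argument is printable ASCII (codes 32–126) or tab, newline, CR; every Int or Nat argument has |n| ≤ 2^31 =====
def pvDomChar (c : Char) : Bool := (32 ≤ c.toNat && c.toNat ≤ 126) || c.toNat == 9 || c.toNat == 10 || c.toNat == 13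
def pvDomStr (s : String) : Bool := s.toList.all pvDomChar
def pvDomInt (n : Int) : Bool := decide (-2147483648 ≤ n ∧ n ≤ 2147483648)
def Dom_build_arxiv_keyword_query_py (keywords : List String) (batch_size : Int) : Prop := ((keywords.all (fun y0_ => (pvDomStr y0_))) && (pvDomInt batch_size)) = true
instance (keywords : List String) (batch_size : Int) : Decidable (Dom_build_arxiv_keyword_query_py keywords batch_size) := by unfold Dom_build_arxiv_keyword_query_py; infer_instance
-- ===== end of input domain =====

-- B streams over the keywords once, growing the current query string term by term and flushing every batch_size terms, instead of A's range/slice batch loop with an inner term list (alternative decomposition, same cost); Pre_ restricts to positive batch_size (batch_size = 0 raises in A; a negative batch_size is an unspecified corner where A's and B's values both defensible).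


-- ===== PORT A =====
def build_arxiv_keyword_query_py (keywords : List String) (batch_size : Int) : List String :=
  (PySem.List.pyRange 0 (keywords.length : Int) batch_size).foldl
    (fun queries i =>
      let batch := PySem.List.slice keywords (some i) (some (i + batch_size))
      let terms := batch.foldl
        (fun terms kw =>
          if PySem.Str.isIn " " kw then
            terms ++ ["all:\"" ++ PySem.Str.replace kw " " "+" ++ "\""]
          else
            terms ++ ["all:" ++ kw]) []
      let kw_part := PySem.Str.join "+OR+" terms
      queries ++ ["(" ++ kw_part ++ ")"]) []

-- ===== PORT B =====
def build_arxiv_keyword_query_py_alt (keywords : List String) (batch_size : Int) : List String :=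
  let s := keywords.foldl
    (fun (st : List String × String × Int) kw =>
      let queries := st.1
      let cur := st.2.1
      let n := st.2.2
      let term :=
        if PySem.Str.isIn " " kw then "all:\"" ++ PySem.Str.replace kw " " "+" ++ "\""
        else "all:" ++ kw
      let cur' := if n == 0 then term else cur ++ "+OR+" ++ term
      let n' := n + 1
      if n' == batch_size then (queries ++ ["(" ++ cur' ++ ")"], "", 0)
      else (queries, cur', n'))
    ([], "", 0)
  if s.2.2 == 0 then s.1 else s.1 ++ ["(" ++ s.2.1 ++ ")"]

-- ===== PRECONDITION & SPEC =====
-- Pre_ excludes non-positive batch_size: batch_size = 0 makes A raise ValueError (range step 0), and a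
-- negative batch_size is an unspecified corner where A returns no queries and B one unlimited batch —
-- both defensible, so those inputs are outside the claim.
def Pre_build_arxiv_keyword_query_py (keywords : List String) (batch_size : Int) : Prop := 1 ≤ batch_size
instance (keywords : List String) (batch_size : Int) : Decidable (Pre_build_arxiv_keyword_query_py keywords batch_size) := by unfold Pre_build_arxiv_keyword_query_py; infer_instance
def pvWitness_build_arxiv_keyword_query_py : List String × Int := (["deep learning", "nlp", "graphs"], 2)

def Spec_build_arxiv_keyword_query_py (keywords : List String) (batch_size : Int) (out : List String) : Prop := out = build_arxiv_keyword_query_py_alt keywords batch_size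
instance (keywords : List String) (batch_size : Int) (out : List String) : Decidable (Spec_build_arxiv_keyword_query_py keywords batch_size out) := by unfold Spec_build_arxiv_keyword_query_py; infer_instance

-- ===== CLAIM (what is proved, stated in full; the proofs are below) =====
def Claim_equal_build_arxiv_keyword_query_py : Prop := ∀ (keywords : List String) (batch_size : Int), Dom_build_arxiv_keyword_query_py keywords batch_size → Pre_build_arxiv_keyword_query_py keywords batch_size → Spec_build_arxiv_keyword_query_py keywords batch_size (build_arxiv_keyword_query_py keywords batch_size)

-- ===== LEMMAS AND PROOFS =====

-- the term each keyword contributes (proof-only abbreviation; both ports inline this expression)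
def pvT (kw : String) : String :=
  if PySem.Str.isIn " " kw then "all:\"" ++ PySem.Str.replace kw " " "+" ++ "\""
  else "all:" ++ kw

-- recursive reference shape: absorb keywords one at a time into the open batch ts, flush at size b
def pvPack (b : Int) (ts : List String) : List String → List String
  | [] => if ts.isEmpty then [] else ["(" ++ PySem.Str.join "+OR+" ts ++ ")"]
  | kw :: l =>
      if ((ts ++ [pvT kw]).length : Int) = b then
        ("(" ++ PySem.Str.join "+OR+" (ts ++ [pvT kw]) ++ ")") :: pvPack b [] l
      else pvPack b (ts ++ [pvT kw]) l

theorem pv_chars_join_snoc (sep t : List Char) :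
    ∀ (ts : List (List Char)), ts ≠ [] →
      PySem.Chars.join sep (ts ++ [t]) = PySem.Chars.join sep ts ++ sep ++ t := by
  intro ts
  induction ts with
  | nil => intro h; exact absurd rfl h
  | cons x xs ih =>
    intro _
    cases xs with
    | nil =>
      simp [PySem.Chars.join_cons_cons, PySem.Chars.join_singleton]
    | cons y r =>
      have h1 : (x :: y :: r) ++ [t] = x :: (y :: (r ++ [t])) := by simp
      rw [h1, PySem.Chars.join_cons_cons]
      rw [show y :: (r ++ [t]) = (y :: r) ++ [t] by simp, ih (by simp)]
      rw [PySem.Chars.join_cons_cons]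
      simp [List.append_assoc]

theorem pv_join_snoc (ts : List String) (t : String) :
    PySem.Str.join "+OR+" (ts ++ [t]) =
      (if ts = [] then t else PySem.Str.join "+OR+" ts ++ "+OR+" ++ t) := by
  by_cases h : ts = []
  · subst h
    simp [PySem.Str.join, PySem.Chars.join_singleton]
  · rw [if_neg h]
    unfold PySem.Str.join
    rw [List.map_append, List.map_singleton,
        pv_chars_join_snoc _ _ _ (by simpa using h)]
    apply String.toList_injective
    simp

-- A's inner accumulator loop builds exactly the map of pvT over the batch
theorem pv_inner_eq_map (l : List String) :
    l.foldl (fun terms kw =>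
        if PySem.Str.isIn " " kw then
          terms ++ ["all:\"" ++ PySem.Str.replace kw " " "+" ++ "\""]
        else
          terms ++ ["all:" ++ kw]) [] = l.map pvT := by
  have h : ∀ (acc : List String), l.foldl (fun terms kw =>
      if PySem.Str.isIn " " kw then
        terms ++ ["all:\"" ++ PySem.Str.replace kw " " "+" ++ "\""]
      else
        terms ++ ["all:" ++ kw]) acc = acc ++ l.map pvT := by
    induction l with
    | nil => intro acc; simp
    | cons x xs ih =>
      intro acc
      rw [List.foldl_cons, ih]
      simp only [List.map_cons, pvT]
      split <;> simp
  simpa using h []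

-- A as a map over the batch-start range
theorem pv_A_eq_mapform (l : List String) (b : Int) :
    build_arxiv_keyword_query_py l b =
      (PySem.List.pyRange 0 (l.length : Int) b).map
        (fun i => "(" ++ PySem.Str.join "+OR+"
            ((PySem.List.slice l (some i) (some (i + b))).map pvT) ++ ")") := by
  unfold build_arxiv_keyword_query_py
  rw [PySem.List.foldl_append_singleton_eq_map]
  simp only [List.nil_append]
  exact List.map_congr_left (fun i _ => by rw [pv_inner_eq_map])

-- pyRange with positive step: cons and shift
theorem pv_pyRange_pos_cons (a b s : Int) (hs : 0 < s) (h : a < b) :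
    PySem.List.pyRange a b s = a :: PySem.List.pyRange (a + s) b s := by
  rw [PySem.List.pyRange_of_pos _ _ hs, PySem.List.pyRange_of_pos _ _ hs]
  by_cases h2 : a + s < b
  · have hdiv : (b - a + s - 1) / s = (b - (a + s) + s - 1) / s + 1 := by
      have := Int.add_mul_ediv_right (b - (a + s) + s - 1) 1 (by omega : s ≠ 0)
      have he : b - (a + s) + s - 1 + 1 * s = b - a + s - 1 := by ring
      rw [he] at this
      omega
    have hnn : 0 ≤ (b - (a + s) + s - 1) / s :=
      Int.ediv_nonneg (by omega) (by omega)
    rw [if_pos (by omega : a < b), if_pos h2, hdiv]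
    have : ((b - (a + s) + s - 1) / s + 1).toNat = ((b - (a + s) + s - 1) / s).toNat + 1 := by
      omega
    rw [this, List.range_succ_eq_map]
    simp only [List.map_cons, List.map_map]
    congr 1
    · simp
    · exact List.map_congr_left (fun k _ => by
        simp [Function.comp]; ring)
  · -- last (short) batch: exactly one index remains
    have h1 : a < b := h
    have hdiv : (b - a + s - 1) / s = 1 := by
      have hz : (b - a + s - 1 - s) / s = 0 :=
        Int.ediv_eq_zero_of_lt (by omega) (by omega)
      have := Int.add_mul_ediv_right (b - a + s - 1 - s) 1 (by omega : s ≠ 0)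
      have he : b - a + s - 1 - s + 1 * s = b - a + s - 1 := by ring
      rw [he, hz] at this
      omega
    rw [if_pos h1, if_neg h2, hdiv]
    simp

theorem pv_pyRange_pos_shift (a b s : Int) (hs : 0 < s) :
    PySem.List.pyRange (a + s) b s = (PySem.List.pyRange a (b - s) s).map (· + s) := by
  rw [PySem.List.pyRange_of_pos _ _ hs, PySem.List.pyRange_of_pos _ _ hs]
  have hc : (if a + s < b then ((b - (a + s) + s - 1) / s).toNat else 0)
      = (if a < b - s then ((b - s - a + s - 1) / s).toNat else 0) := by
    by_cases h : a + s < b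
    · rw [if_pos h, if_pos (by omega)]
      congr 2
      ring
    · rw [if_neg h, if_neg (by omega)]
  rw [hc, List.map_map]
  exact List.map_congr_left (fun k _ => by simp; ring)

-- pvPack with a partial batch unfolds to one full chunk plus a fresh pvPack
theorem pv_pack_chunk (b : Int) (hb : 1 ≤ b) :
    ∀ (l ts : List String), (ts.length : Int) < b →
      pvPack b ts l =
        if ts = [] ∧ l = [] then []
        else ("(" ++ PySem.Str.join "+OR+" (ts ++ (l.take (b.toNat - ts.length)).map pvT) ++ ")")
              :: pvPack b [] (l.drop (b.toNat - ts.length)) := by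
  intro l
  induction l with
  | nil =>
    intro ts hts
    by_cases h : ts = []
    · subst h; simp [pvPack]
    · simp [pvPack, h, List.isEmpty_iff]
  | cons kw l ih =>
    intro ts hts
    have hkpos : 1 ≤ b.toNat := by omega
    have hm : ts.length < b.toNat := by omega
    by_cases hfull : ((ts.length : Int) + 1) = b
    · have hk : b.toNat - ts.length = 1 := by omega
      rw [show pvPack b ts (kw :: l)
            = ("(" ++ PySem.Str.join "+OR+" (ts ++ [pvT kw]) ++ ")") :: pvPack b [] l from by
          simp [pvPack, hfull]]
      rw [if_neg (by simp)]
      simp [hk]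
    · have hlt : ((ts ++ [pvT kw]).length : Int) < b := by
        simp; omega
      rw [show pvPack b ts (kw :: l) = pvPack b (ts ++ [pvT kw]) l from by
          simp [pvPack, hfull]]
      rw [ih _ hlt]
      have hne : ¬(ts ++ [pvT kw] = [] ∧ l = []) := by simp
      rw [if_neg hne, if_neg (by simp)]
      have hk1 : b.toNat - (ts ++ [pvT kw]).length = b.toNat - ts.length - 1 := by
        simp; omega
      have hk2 : b.toNat - ts.length = (b.toNat - ts.length - 1) + 1 := by omega
      rw [hk1, hk2]
      simp [List.take_succ_cons, List.drop_succ_cons]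

-- named copy of B's step function (definitionally equal to the lambda in the port)
def pvStep (b : Int) (st : List String × String × Int) (kw : String) :
    List String × String × Int :=
  let queries := st.1
  let cur := st.2.1
  let n := st.2.2
  let term :=
    if PySem.Str.isIn " " kw then "all:\"" ++ PySem.Str.replace kw " " "+" ++ "\""
    else "all:" ++ kw
  let cur' := if n == 0 then term else cur ++ "+OR+" ++ term
  let n' := n + 1
  if n' == b then (queries ++ ["(" ++ cur' ++ ")"], "", 0)
  else (queries, cur', n')

def pvFinalize (s : List String × String × Int) : List String :=
  if s.2.2 == 0 then s.1 else s.1 ++ ["(" ++ s.2.1 ++ ")"]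

theorem pv_alt_eq_step_fold (keywords : List String) (b : Int) :
    build_arxiv_keyword_query_py_alt keywords b =
      pvFinalize (keywords.foldl (pvStep b) ([], "", 0)) := rfl

theorem pv_join_nil : PySem.Str.join "+OR+" [] = "" := by
  simp [PySem.Str.join, PySem.Chars.join_nil]

-- B's fold with invariant state equals pvPack
theorem pv_B_fold_eq_pack (b : Int) (hb : 1 ≤ b) :
    ∀ (l q ts : List String), (ts.length : Int) < b →
      pvFinalize (l.foldl (pvStep b) (q, PySem.Str.join "+OR+" ts, (ts.length : Int)))
        = q ++ pvPack b ts l := by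
  intro l
  induction l with
  | nil =>
    intro q ts hts
    by_cases h : ts = []
    · subst h; simp [pvPack, pvFinalize]
    · have h0 : ((ts.length : Int) == 0) = false := by
        simp [List.length_eq_zero_iff, h]
      simp [pvPack, pvFinalize, h, List.isEmpty_iff, h0]
  | cons kw l ih =>
    intro q ts hts
    have hcur : (if ((ts.length : Int) == 0) then pvT kw
          else PySem.Str.join "+OR+" ts ++ "+OR+" ++ pvT kw)
        = PySem.Str.join "+OR+" (ts ++ [pvT kw]) := by
      rw [pv_join_snoc]
      by_cases h : ts = [] <;> simp [h, List.length_eq_zero_iff]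
    have hstep : pvStep b (q, PySem.Str.join "+OR+" ts, (ts.length : Int)) kw =
        (if ((ts.length : Int) + 1 == b)
         then (q ++ ["(" ++ PySem.Str.join "+OR+" (ts ++ [pvT kw]) ++ ")"], "", 0)
         else (q, PySem.Str.join "+OR+" (ts ++ [pvT kw]), (ts.length : Int) + 1)) := by
      simp only [pvStep, pvT] at hcur ⊢
      rw [hcur]
    by_cases hfull : (ts.length : Int) + 1 = b
    · rw [show pvPack b ts (kw :: l)
            = ("(" ++ PySem.Str.join "+OR+" (ts ++ [pvT kw]) ++ ")") :: pvPack b [] l from by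
          simp [pvPack, hfull]]
      rw [List.foldl_cons, hstep, if_pos (by simpa using hfull)]
      rw [show (("" : String), (0 : Int))
            = (PySem.Str.join "+OR+" ([] : List String), ((([] : List String).length : Int)))
          from by rw [pv_join_nil]; rfl]
      rw [ih _ [] (by simp; omega)]
      simp
    · rw [show pvPack b ts (kw :: l) = pvPack b (ts ++ [pvT kw]) l from by
          simp [pvPack, hfull]]
      rw [List.foldl_cons, hstep, if_neg (by simpa using hfull)]
      have hlen : (ts.length : Int) + 1 = (((ts ++ [pvT kw]).length : Int)) := by
        simp
      rw [hlen, ih _ (ts ++ [pvT kw]) (by simp; omega)]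

-- mapform equals pvPack [] (strong induction over the list length)
theorem pv_mapform_eq_pack (b : Int) (hb : 1 ≤ b) :
    ∀ (n : Nat) (l : List String), l.length ≤ n →
      (PySem.List.pyRange 0 (l.length : Int) b).map
        (fun i => "(" ++ PySem.Str.join "+OR+"
            ((PySem.List.slice l (some i) (some (i + b))).map pvT) ++ ")") = pvPack b [] l := by
  have hbp : (0 : Int) < b := by omega
  intro n
  induction n with
  | zero =>
    intro l hl
    have : l = [] := List.length_eq_zero_iff.mp (by omega)
    subst this
    rw [PySem.List.pyRange_of_pos _ _ hbp]
    simp [pvPack]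
  | succ n ih =>
    intro l hl
    match l with
    | [] =>
      rw [PySem.List.pyRange_of_pos _ _ hbp]
      simp [pvPack]
    | x :: xs =>
      have hL : (0 : Int) < (((x :: xs).length : Int)) := by simp
      rw [pv_pyRange_pos_cons 0 _ b hbp hL, List.map_cons]
      have hhead : PySem.List.slice (x :: xs) (some 0) (some (0 + b))
          = (x :: xs).take b.toNat := by
        rw [zero_add, PySem.List.slice_zero_start, PySem.List.slice_to _ (by omega)]
      have hshift := pv_pyRange_pos_shift 0 (((x :: xs).length : Int)) b hbp
      rw [hshift, List.map_map]
      have hrange : PySem.List.pyRange 0 ((((x :: xs).length : Int)) - b) b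
          = PySem.List.pyRange 0 ((((x :: xs).drop b.toNat).length : Int)) b := by
        by_cases hless : b < (((x :: xs).length : Int))
        · congr 1
          rw [List.length_drop]
          omega
        · rw [PySem.List.pyRange_of_pos _ _ hbp, PySem.List.pyRange_of_pos _ _ hbp]
          rw [if_neg (by omega), if_neg (by rw [List.length_drop]; omega)]
      rw [hrange]
      have hcong : ∀ i ∈ PySem.List.pyRange 0 ((((x :: xs).drop b.toNat).length : Int)) b,
          ((fun i => "(" ++ PySem.Str.join "+OR+"
              ((PySem.List.slice (x :: xs) (some i) (some (i + b))).map pvT) ++ ")") ∘ (· + b)) i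
          = (fun i => "(" ++ PySem.Str.join "+OR+"
              ((PySem.List.slice ((x :: xs).drop b.toNat) (some i) (some (i + b))).map pvT) ++ ")") i := by
        intro i hi
        have hi0 : 0 ≤ i := ((PySem.List.mem_pyRange_iff_of_pos hbp i).mp hi).1
        simp only [Function.comp]
        congr 3
        rw [PySem.List.slice_toNat _ (by omega) (by omega),
            PySem.List.slice_toNat _ (by omega) (by omega)]
        have e1 : (i + b).toNat = i.toNat + b.toNat := by omega
        rw [List.drop_drop, e1,
            show b.toNat + i.toNat = i.toNat + b.toNat from by omega]
        congr 1
        congr 1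
        omega
      rw [List.map_congr_left hcong]
      rw [ih ((x :: xs).drop b.toNat) (by rw [List.length_drop]; simp at hl ⊢; omega)]
      rw [pv_pack_chunk b hb (x :: xs) [] (by simp; omega)]
      rw [if_neg (by simp)]
      rw [hhead]
      simp

-- ===== VERDICT (by name: the statement is the Claim_ definition above) =====
theorem build_arxiv_keyword_query_py_spec : Claim_equal_build_arxiv_keyword_query_py := by
  intro keywords batch_size _ hpre
  show build_arxiv_keyword_query_py keywords batch_size = build_arxiv_keyword_query_py_alt keywords batch_size
  rw [pv_A_eq_mapform, pv_mapform_eq_pack batch_size hpre keywords.length keywords le_rfl]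
  have h := pv_B_fold_eq_pack batch_size hpre keywords [] [] (by simpa using hpre)
  rw [pv_alt_eq_step_fold, show (([], "", 0) : List String × String × Int)
        = (([] : List String), PySem.Str.join "+OR+" ([] : List String),
           ((([] : List String).length : Int))) from by rw [pv_join_nil]; rfl, h]
  simp
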